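-- pv_equiv track=rewrite | github.com/anmol2982002/mcp-developer-assistant | ai/risk_feature_extractor.py | _has_large_additions
-- ===== SOURCE A (Python) =====
-- def _has_large_additions(diff: str, threshold: int = 200) -> bool:
--     """Check if any single file has large additions."""
--     current_file_additions = 0
--
--     for line in diff.splitlines():
--         if line.startswith("diff --git"):
--             if current_file_additions > threshold:
--                 return True
--             current_file_additions = 0
--         elif line.startswith("+") and not line.startswith("+++"):
--             current_file_additions += 1
--
--     return current_file_additions > threshold
-- ===== SOURCE B (Python) =====
-- def _has_large_additions(diff: str, threshold: int = 200) -> bool: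
--     """Check if any single file has large additions.
--
--     Partition-then-reduce: split the diff into per-file groups (the text
--     before the first 'diff --git' line forms the initial group), then count
--     added lines per group and check whether any count exceeds the threshold.
--     """
--     groups = []
--     current = []
--     for line in diff.splitlines():
--         if line.startswith("diff --git"):
--             groups.append(current)
--             current = []
--         else:
--             current.append(line)
--     groups.append(current)
--
--     def count_additions(group):
--         return sum(1 for l in group if l.startswith("+") and not l.startswith("+++"))
--
--     return any(count_additions(g) > threshold for g in groups)
-- ===== Notes on version B (the rewrite author's own statement) =====
-- stated objective: alternative
-- what changed: Replaced A's single streaming loop with a running per-file counter and early return by a partition-then-reduce: one pass splits the lines into per-file groups at each 'diff --git' line (the pre-first-marker text is the initial group), then a separate reduce counts '+'-but-not-'+++' lines per group and returns any(count > threshold).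
import Mathlib
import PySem

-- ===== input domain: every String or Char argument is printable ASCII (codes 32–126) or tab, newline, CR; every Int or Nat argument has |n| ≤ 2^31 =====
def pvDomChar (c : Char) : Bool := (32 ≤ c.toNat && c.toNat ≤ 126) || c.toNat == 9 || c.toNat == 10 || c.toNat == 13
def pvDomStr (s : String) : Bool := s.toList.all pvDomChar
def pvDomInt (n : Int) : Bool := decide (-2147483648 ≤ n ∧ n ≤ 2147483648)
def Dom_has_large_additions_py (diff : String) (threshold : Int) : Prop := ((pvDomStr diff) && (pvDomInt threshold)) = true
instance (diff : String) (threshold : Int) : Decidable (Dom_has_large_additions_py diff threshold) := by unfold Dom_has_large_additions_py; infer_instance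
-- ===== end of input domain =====

-- B re-implements A as an explicit partition-into-per-file-groups pass followed by a
-- count-per-group reduce, instead of A's streaming counter with early return (objective: alternative).

-- ===== PORT A =====
-- A's loop with early return, as structural recursion over the remaining lines
-- carrying current_file_additions.
def hlaGoA (lines : List String) (acc : Int) (threshold : Int) : Bool :=
  match lines with
  | [] => acc > threshold
  | line :: rest =>
    if PySem.Str.startswith line "diff --git" then
      if acc > threshold then true else hlaGoA rest 0 threshold
    else if PySem.Str.startswith line "+" && !(PySem.Str.startswith line "+++") then
      hlaGoA rest (acc + 1) threshold
    else
      hlaGoA rest acc threshold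

def has_large_additions_py (diff : String) (threshold : Int) : Bool :=
  hlaGoA (PySem.Str.splitlines diff) 0 threshold

-- ===== PORT B =====
-- Source B's grouping loop: state (groups, current); a 'diff --git' line closes the
-- current group and starts a fresh one, other lines are appended to the current group.
def hlaStep (st : List (List String) × List String) (line : String) :
    List (List String) × List String :=
  if PySem.Str.startswith line "diff --git" then (st.1 ++ [st.2], [])
  else (st.1, st.2 ++ [line])

-- Source B's count_additions: sum of 1 over the lines starting with '+' but not '+++'.
def hlaCount (group : List String) : Int :=
  group.foldl
    (fun n l =>
      if PySem.Str.startswith l "+" && !(PySem.Str.startswith l "+++") then n + 1 else n) 0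

def has_large_additions_py_alt (diff : String) (threshold : Int) : Bool :=
  let st := (PySem.Str.splitlines diff).foldl hlaStep ([], [])
  (st.1 ++ [st.2]).any (fun g => hlaCount g > threshold)

-- ===== PRECONDITION & SPEC =====
def Spec_has_large_additions_py (diff : String) (threshold : Int) (out : Bool) : Prop := out = has_large_additions_py_alt diff threshold
instance (diff : String) (threshold : Int) (out : Bool) : Decidable (Spec_has_large_additions_py diff threshold out) := by unfold Spec_has_large_additions_py; infer_instance

-- ===== CLAIM (what is proved, stated in full; the proofs are below) =====
def Claim_equal_has_large_additions_py : Prop := ∀ (diff : String) (threshold : Int), Dom_has_large_additions_py diff threshold → Spec_has_large_additions_py diff threshold (has_large_additions_py diff threshold)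

-- ===== LEMMAS AND PROOFS =====

-- Separator-split of the lines: (first group, later groups); separator lines are dropped.
def hlaSplit (lines : List String) : List String × List (List String) :=
  match lines with
  | [] => ([], [])
  | line :: rest =>
    let p := hlaSplit rest
    if PySem.Str.startswith line "diff --git" then ([], p.1 :: p.2)
    else (line :: p.1, p.2)

def hlaAnyBig (gs : List (List String)) (threshold : Int) : Bool :=
  gs.any (fun g => hlaCount g > threshold)

theorem hlaCount_shift (g : List String) : ∀ n : Int,
    g.foldl (fun n l =>
      if PySem.Str.startswith l "+" && !(PySem.Str.startswith l "+++") then n + 1 else n) n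
      = n + hlaCount g := by
  induction g with
  | nil => intro n; simp [hlaCount]
  | cons x xs ih =>
    intro n
    simp only [hlaCount, List.foldl_cons]
    by_cases hx : (PySem.Str.startswith x "+" && !(PySem.Str.startswith x "+++")) = true
    · rw [if_pos hx, if_pos hx, ih, ih]; ring
    · rw [if_neg hx, if_neg hx, ih, ih]; ring

theorem hlaCount_cons (l : String) (g : List String) :
    hlaCount (l :: g) =
      (if PySem.Str.startswith l "+" && !(PySem.Str.startswith l "+++")
       then hlaCount g + 1 else hlaCount g) := by
  simp only [hlaCount, List.foldl_cons]
  by_cases hl : (PySem.Str.startswith l "+" && !(PySem.Str.startswith l "+++")) = true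
  · rw [if_pos hl, if_pos hl, hlaCount_shift, hlaCount_shift]; omega
  · rw [if_neg hl, if_neg hl]

theorem hlaSplit_cons_pos (line : String) (rest : List String)
    (hd : PySem.Str.startswith line "diff --git" = true) :
    hlaSplit (line :: rest) = ([], (hlaSplit rest).1 :: (hlaSplit rest).2) := by
  simp only [hlaSplit]; rw [if_pos hd]

theorem hlaSplit_cons_neg (line : String) (rest : List String)
    (hd : ¬ PySem.Str.startswith line "diff --git" = true) :
    hlaSplit (line :: rest) = (line :: (hlaSplit rest).1, (hlaSplit rest).2) := by
  simp only [hlaSplit]; rw [if_neg hd]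

theorem hlaGoA_eq (lines : List String) (threshold : Int) : ∀ acc : Int,
    hlaGoA lines acc threshold =
      ((decide (acc + hlaCount (hlaSplit lines).1 > threshold)) ||
        hlaAnyBig (hlaSplit lines).2 threshold) := by
  induction lines with
  | nil => intro acc; simp [hlaGoA, hlaSplit, hlaAnyBig, hlaCount]
  | cons line rest ih =>
    intro acc
    by_cases hd : PySem.Str.startswith line "diff --git" = true
    · simp only [hlaGoA, hlaSplit_cons_pos line rest hd, if_pos hd]
      rw [ih 0]
      by_cases ha : acc > threshold
      · rw [if_pos ha]
        have h1 : decide (acc + hlaCount [] > threshold) = true := by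
          simp [hlaCount]; omega
        simp [h1]
      · rw [if_neg ha]
        have h1 : decide (acc + hlaCount [] > threshold) = false := by
          simp [hlaCount]; omega
        have h2 : decide ((0:Int) + hlaCount (hlaSplit rest).1 > threshold)
            = decide (hlaCount (hlaSplit rest).1 > threshold) := by
          simp
        simp only [h1, h2, hlaAnyBig, List.any_cons, Bool.false_or]
    · simp only [hlaGoA, hlaSplit_cons_neg line rest hd, if_neg hd]
      by_cases hp : (PySem.Str.startswith line "+" && !(PySem.Str.startswith line "+++")) = true
      · rw [if_pos hp, ih (acc + 1)]
        simp only [hlaCount_cons, if_pos hp]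
        have : acc + 1 + hlaCount (hlaSplit rest).1
            = acc + (hlaCount (hlaSplit rest).1 + 1) := by ring
        rw [this]
      · rw [if_neg hp, ih acc]
        simp only [hlaCount_cons, if_neg hp]

theorem hlaFold_eq (lines : List String) (threshold : Int) :
    ∀ (groups : List (List String)) (cur : List String),
      (((lines.foldl hlaStep (groups, cur)).1 ++ [(lines.foldl hlaStep (groups, cur)).2]).any
          (fun g => hlaCount g > threshold))
        = (hlaAnyBig groups threshold ||
            hlaAnyBig ((cur ++ (hlaSplit lines).1) :: (hlaSplit lines).2) threshold) := by
  induction lines with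
  | nil =>
    intro groups cur
    simp [hlaAnyBig, hlaSplit, Bool.or_comm]
  | cons line rest ih =>
    intro groups cur
    by_cases hd : PySem.Str.startswith line "diff --git" = true
    · simp only [List.foldl_cons, hlaStep, if_pos hd, hlaSplit_cons_pos line rest hd]
      rw [ih (groups ++ [cur]) []]
      simp [hlaAnyBig, Bool.or_assoc]
    · simp only [List.foldl_cons, hlaStep, if_neg hd, hlaSplit_cons_neg line rest hd]
      rw [ih groups (cur ++ [line])]
      simp [hlaAnyBig]

-- ===== VERDICT (by name: the statement is the Claim_ definition above) =====
theorem has_large_additions_py_spec : Claim_equal_has_large_additions_py := by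
  intro diff threshold _
  show has_large_additions_py diff threshold = has_large_additions_py_alt diff threshold
  unfold has_large_additions_py has_large_additions_py_alt
  rw [hlaGoA_eq _ _ 0, hlaFold_eq _ _ [] []]
  simp [hlaAnyBig]
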